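-- pv_equiv track=rewrite | github.com/constabIe/counselor | backend/llm_service/src/aihr/struct/tags.py | _bucket_from_age
-- ===== SOURCE A (Python) =====
-- AGE_BUCKETS = [
--     (18, 25, "18-25"),
--     (26, 30, "26-30"),
--     (31, 45, "31-45"),
--     (46, 50, "46-50"),
--     (51, 55, "51-55"),
--     (56, 60, "56-60"),
-- ]
--
-- def _bucket_from_age(age: int | None) -> str | None:
--     if age is None:
--         return None
--     try:
--         a = int(age)
--     except Exception:
--         return None
--     for lo, hi, tag in AGE_BUCKETS:
--         if lo <= a <= hi:
--             return tag
--     return None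
-- ===== SOURCE B (Python) =====
-- AGE_BUCKETS = [
--     (18, 25, "18-25"),
--     (26, 30, "26-30"),
--     (31, 45, "31-45"),
--     (46, 50, "46-50"),
--     (51, 55, "51-55"),
--     (56, 60, "56-60"),
-- ]
--
-- AGE_TABLE = {a: tag for lo, hi, tag in AGE_BUCKETS for a in range(lo, hi + 1)}
--
-- def _bucket_from_age(age):
--     if age is None:
--         return None
--     try:
--         a = int(age)
--     except Exception:
--         return None
--     return AGE_TABLE.get(a)
-- ===== Notes on version B (the rewrite author's own statement) =====
-- stated objective: simpler
-- what changed: Replaces the per-call linear scan over AGE_BUCKETS range triples with a module-level precomputed age-to-tag dict built once, so the body is a single table lookup.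
import Mathlib
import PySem

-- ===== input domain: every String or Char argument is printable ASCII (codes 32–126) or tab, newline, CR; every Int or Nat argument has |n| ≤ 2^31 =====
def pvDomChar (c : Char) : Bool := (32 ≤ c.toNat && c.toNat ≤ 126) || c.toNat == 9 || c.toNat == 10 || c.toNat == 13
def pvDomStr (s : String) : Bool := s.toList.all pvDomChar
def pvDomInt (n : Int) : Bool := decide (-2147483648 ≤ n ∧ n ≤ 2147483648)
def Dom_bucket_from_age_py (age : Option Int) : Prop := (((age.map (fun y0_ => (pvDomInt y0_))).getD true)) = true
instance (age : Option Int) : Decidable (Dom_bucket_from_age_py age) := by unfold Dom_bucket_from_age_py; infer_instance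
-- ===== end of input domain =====

-- B replaces A's linear scan over the bucket ranges with a precomputed age→tag table looked up once (simpler body; same values, None included).

-- ===== PORT A =====
-- AGE_BUCKETS (module constant)
def pvAgeBuckets : List (Int × Int × String) :=
  [(18, 25, "18-25"), (26, 30, "26-30"), (31, 45, "31-45"),
   (46, 50, "46-50"), (51, 55, "51-55"), (56, 60, "56-60")]

-- the 'for lo, hi, tag in AGE_BUCKETS' loop with its early return
def pvBucketLoop (a : Int) : List (Int × Int × String) → Option String
  | [] => none
  | (lo, hi, tag) :: rest => if lo ≤ a ∧ a ≤ hi then some tag else pvBucketLoop a rest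

-- int(age) on an int is the identity and never raises, so the try/except body is just 'a := age'
def bucket_from_age_py (age : Option Int) : Option String :=
  match age with
  | none => none
  | some a => pvBucketLoop a pvAgeBuckets

-- ===== PORT B =====
-- AGE_TABLE = {a: tag for lo, hi, tag in AGE_BUCKETS for a in range(lo, hi + 1)}
def pvAgeTable : PySem.Dict Int String :=
  pvAgeBuckets.foldl
    (fun d b => (PySem.List.pyRange b.1 (b.2.1 + 1) 1).foldl (fun d a => d.insert a b.2.2) d)
    PySem.Dict.empty

def bucket_from_age_py_alt (age : Option Int) : Option String :=
  match age with
  | none => none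
  | some a => pvAgeTable.get? a

-- ===== PRECONDITION & SPEC =====
def Spec_bucket_from_age_py (age : Option Int) (out : Option String) : Prop := out = bucket_from_age_py_alt age
instance (age : Option Int) (out : Option String) : Decidable (Spec_bucket_from_age_py age out) := by unfold Spec_bucket_from_age_py; infer_instance

-- ===== CLAIM (what is proved, stated in full; the proofs are below) =====
def Claim_equal_bucket_from_age_py : Prop := ∀ (age : Option Int), Dom_bucket_from_age_py age → Spec_bucket_from_age_py age (bucket_from_age_py age)

-- ===== LEMMAS AND PROOFS =====

-- the table lookup agrees with the range scan at every age
set_option maxRecDepth 4096 in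
theorem pvTable_eq_scan (a : Int) : pvAgeTable.get? a = pvBucketLoop a pvAgeBuckets := by
  by_cases h : 18 ≤ a ∧ a ≤ 60
  · obtain ⟨h1, h2⟩ := h
    interval_cases a <;> decide
  · have hk : a ∉ pvAgeTable.keys := by
      intro hm
      have hkeys : pvAgeTable.keys = ([18, 19, 20, 21, 22, 23, 24, 25, 26, 27, 28, 29, 30, 31, 32, 33, 34, 35, 36, 37, 38, 39, 40, 41, 42, 43, 44, 45, 46, 47, 48, 49, 50, 51, 52, 53, 54, 55, 56, 57, 58, 59, 60] : List Int) := by decide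
      rw [hkeys] at hm
      simp only [List.mem_cons, List.not_mem_nil, or_false] at hm
      omega
    rw [(PySem.Dict.get?_eq_none_iff_not_mem_keys pvAgeTable a).mpr hk]
    simp only [pvAgeBuckets, pvBucketLoop]
    split_ifs <;> first | rfl | omega

-- ===== VERDICT (by name: the statement is the Claim_ definition above) =====
theorem bucket_from_age_py_spec : Claim_equal_bucket_from_age_py := by
  intro age _
  unfold Spec_bucket_from_age_py bucket_from_age_py bucket_from_age_py_alt
  cases age with
  | none => rfl
  | some a => exact (pvTable_eq_scan a).symm
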